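-- pv_equiv track=rewrite | github.com/Venkmine/Proxx | fabric/export.py | _format_failure_summary_text
-- ===== SOURCE A (Python) =====
-- from typing import Any, Dict
--
-- def _format_failure_summary_text(summary: Dict[str, Any]) -> list:
--     """Format failure summary as text lines."""
--     lines = [
--         "Failure Summary",
--         "---------------",
--     ]
--
--     by_engine = summary["by_engine"]
--     has_any_failures = False
--
--     for engine in sorted(by_engine.keys()):
--         engine_failures = by_engine[engine]
--         if not engine_failures:
--             continue
--
--         has_any_failures = True
--         # Capitalize engine name for display
--         display_name = engine.capitalize() + ":"
--         lines.append(display_name)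
--
--         # Sort reasons: by count desc, then name asc (deterministic)
--         sorted_reasons = sorted(
--             engine_failures.keys(),
--             key=lambda r: (-engine_failures[r], r)
--         )
--
--         for reason in sorted_reasons:
--             count = engine_failures[reason]
--             lines.append(f"  {reason}: {count}")
--
--         lines.append("")
--
--     # Remove trailing empty line if failures were added
--     if lines and lines[-1] == "":
--         lines = lines[:-1]
--
--     # If no failures, add explicit message
--     if not has_any_failures:
--         lines.append("No failures recorded.")
--
--     return lines
-- ===== SOURCE B (Python) =====
-- def _format_failure_summary_text(summary):
--     """Format failure summary as text lines."""
--     triples = sorted(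
--         (engine, -count, reason)
--         for engine, failures in summary["by_engine"].items()
--         for reason, count in failures.items()
--     )
--     lines = ["Failure Summary", "---------------"]
--     prev = None
--     for engine, neg_count, reason in triples:
--         if engine != prev:
--             if prev is not None:
--                 lines.append("")
--             lines.append(engine.capitalize() + ":")
--             prev = engine
--         lines.append(f"  {reason}: {-neg_count}")
--     if prev is None:
--         lines.append("No failures recorded.")
--     return lines
-- ===== Notes on version B (the rewrite author's own statement) =====
-- stated objective: alternative
-- what changed: B flattens all failures into (engine, -count, reason) triples, sorts them ONCE globally by lexicographic tuple order, and emits headings and blank-line separators in a single group-by scan keyed on a prev-engine marker, instead of A's outer loop over sorted engine keys with a per-engine inner sort, a has_any flag, a trailing blank sentinel and a final trim.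
import Mathlib
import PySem

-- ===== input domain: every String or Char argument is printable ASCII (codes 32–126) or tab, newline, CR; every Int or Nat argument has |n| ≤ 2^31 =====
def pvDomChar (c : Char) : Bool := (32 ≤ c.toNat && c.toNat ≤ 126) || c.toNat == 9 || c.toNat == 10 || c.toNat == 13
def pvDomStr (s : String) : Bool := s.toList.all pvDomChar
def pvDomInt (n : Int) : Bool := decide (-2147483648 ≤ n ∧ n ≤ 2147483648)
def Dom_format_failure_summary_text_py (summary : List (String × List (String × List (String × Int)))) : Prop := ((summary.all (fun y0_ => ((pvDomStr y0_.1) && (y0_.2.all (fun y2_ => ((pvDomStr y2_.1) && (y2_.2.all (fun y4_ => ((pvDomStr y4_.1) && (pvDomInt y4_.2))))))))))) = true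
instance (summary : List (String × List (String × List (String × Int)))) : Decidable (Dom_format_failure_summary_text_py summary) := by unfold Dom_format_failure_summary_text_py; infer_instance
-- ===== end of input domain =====

-- B flattens all failures into (engine, -count, reason) triples, sorts them once globally by
-- lexicographic tuple order and emits headings/separators in a single group-by scan with a
-- prev marker, instead of A's per-engine inner sorts with a trailing-blank sentinel and trim;
-- same cost, a different algorithm (equivalence proved on Pre_).


-- shared input decoding: the Python caller receives nested dicts; the assoc-list argument is
-- read back into PySem.Dicts (last duplicate key wins, first position kept — dict semantics)
def pvByEngine (summary : List (String × List (String × List (String × Int)))) : PySem.Dict String (PySem.Dict String Int) :=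
  let d : PySem.Dict String (PySem.Dict String (PySem.Dict String Int)) :=
    PySem.Dict.ofList (summary.map (fun p => (p.1, PySem.Dict.ofList (p.2.map (fun q => (q.1, PySem.Dict.ofList q.2))))))
  (d.get? "by_engine").getD PySem.Dict.empty   -- KeyError when absent: excluded by Pre_

-- str.capitalize(): first char uppercased, rest lowered — exact on the ASCII domain
def pvCapitalize (s : String) : String :=
  match s.toList with
  | [] => ""
  | c :: rest => String.ofList (PySem.Chars.upperChar c :: PySem.Chars.lower rest)

-- ===== PORT A =====
def format_failure_summary_text_py (summary : List (String × List (String × List (String × Int)))) : List String :=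
  -- lines/has_any_failures of the Python loop, as the foldl state; trailing-"" trim and
  -- the no-failure message afterwards, in the Python's order
  match (PySem.List.sorted (pvByEngine summary).keys (fun k => k) false).foldl
      (fun (st : List String × Bool) engine =>
        let ef := ((pvByEngine summary).get? engine).getD PySem.Dict.empty
        if ef.items.isEmpty then st
        else
          let lines := st.1 ++ [pvCapitalize engine ++ ":"]
          let sortedReasons := PySem.List.sorted2 ef.keys (fun r => -(ef.getD r 0)) (fun r => r) false
          let lines := sortedReasons.foldl (fun ls r => ls ++ ["  " ++ r ++ ": " ++ PySem.Int.toStr (ef.getD r 0)]) lines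
          (lines ++ [""], true))
      (["Failure Summary", "---------------"], false) with
  | (lines, has_any) =>
    let lines := if lines.getLast? = some "" then lines.dropLast else lines
    if has_any then lines else lines ++ ["No failures recorded."]

-- ===== PORT B =====
-- the line f"  {reason}: {-neg_count}" for a triple (engine, neg_count, reason)
def pvLineT (t : String × Int × String) : String := "  " ++ t.2.2 ++ ": " ++ PySem.Int.toStr (-t.2.1)

-- body of B's single for-loop: state = (lines, prev)
def pvStep (st : List String × Option String) (t : String × Int × String) : List String × Option String :=
  if some t.1 ≠ st.2 then
    ((if st.2 = none then st.1 else st.1 ++ [""]) ++ [pvCapitalize t.1 ++ ":"] ++ [pvLineT t], some t.1)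
  else (st.1 ++ [pvLineT t], st.2)

def format_failure_summary_text_py_alt (summary : List (String × List (String × List (String × Int)))) : List String :=
  -- flatten to (engine, -count, reason) triples, ONE global sort by Python's tuple
  -- (= lexicographic) order, then a single group-by scan with a prev-engine marker
  let byEngine := pvByEngine summary
  let triples := byEngine.items.flatMap (fun p => p.2.items.map (fun q => (p.1, -q.2, q.1)))
  let ts := PySem.List.sorted triples (fun t => toLex (t.1, toLex (t.2.1, t.2.2))) false
  let st := ts.foldl pvStep (["Failure Summary", "---------------"], none)
  if st.2 = none then st.1 ++ ["No failures recorded."] else st.1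

-- ===== PRECONDITION & SPEC =====
-- Pre_ excludes exactly the inputs with no "by_engine" key, on which the Python A raises KeyError.
def Pre_format_failure_summary_text_py (summary : List (String × List (String × List (String × Int)))) : Prop :=
  "by_engine" ∈ summary.map (·.1)
instance (summary : List (String × List (String × List (String × Int)))) : Decidable (Pre_format_failure_summary_text_py summary) := by unfold Pre_format_failure_summary_text_py; infer_instance

def pvWitness_format_failure_summary_text_py : (List (String × List (String × List (String × Int)))) :=
  [("by_engine", [("alpha", [("timeout", 2), ("oom", 5)]), ("beta", [])])]

def Spec_format_failure_summary_text_py (summary : List (String × List (String × List (String × Int)))) (out : List String) : Prop := out = format_failure_summary_text_py_alt summary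
instance (summary : List (String × List (String × List (String × Int)))) (out : List String) : Decidable (Spec_format_failure_summary_text_py summary out) := by unfold Spec_format_failure_summary_text_py; infer_instance

-- ===== CLAIM (what is proved, stated in full; the proofs are below) =====
def Claim_equal_format_failure_summary_text_py : Prop := ∀ (summary : List (String × List (String × List (String × Int)))), Dom_format_failure_summary_text_py summary → Pre_format_failure_summary_text_py summary → Spec_format_failure_summary_text_py summary (format_failure_summary_text_py summary)

-- ===== LEMMAS AND PROOFS =====

-- proof-only abbreviations for the pieces both programs are built from
def pvEf (d : PySem.Dict String (PySem.Dict String Int)) (e : String) : PySem.Dict String Int :=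
  (d.get? e).getD PySem.Dict.empty

def pvRs (d : PySem.Dict String (PySem.Dict String Int)) (e : String) : List String :=
  PySem.List.sorted2 (pvEf d e).keys (fun r => -((pvEf d e).getD r 0)) (fun r => r) false

def pvBlock (d : PySem.Dict String (PySem.Dict String Int)) (e : String) : List String :=
  (pvCapitalize e ++ ":") :: (pvRs d e).map (fun r => "  " ++ r ++ ": " ++ PySem.Int.toStr ((pvEf d e).getD r 0))

def pvGrp (d : PySem.Dict String (PySem.Dict String Int)) (e : String) : List (String × Int × String) :=
  (pvRs d e).map (fun r => (e, -((pvEf d e).getD r 0), r))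

def pvEngs (d : PySem.Dict String (PySem.Dict String Int)) : List String :=
  (PySem.List.sorted d.keys (fun k => k) false).filter (fun e => !(pvEf d e).items.isEmpty)

-- every value of a dict built by a fold of inserts comes from the base dict or the pair list
theorem pvFoldlInsertValues {κ ν : Type} [BEq κ] [LawfulBEq κ] (l : List (κ × ν)) (d : PySem.Dict κ ν) :
    ∀ w ∈ (l.foldl (fun d p => d.insert p.1 p.2) d).values, w ∈ d.values ∨ ∃ p ∈ l, w = p.2 := by
  induction l generalizing d with
  | nil => intro w hw; exact Or.inl hw
  | cons p l ih =>
    intro w hw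
    simp only [List.foldl_cons] at hw
    rcases ih (d.insert p.1 p.2) w hw with h | ⟨q, hq, hwq⟩
    · rcases PySem.Dict.mem_values_insert d p.1 p.2 w h with h' | h'
      · exact Or.inr ⟨p, List.mem_cons_self, h'⟩
      · exact Or.inl h'
    · exact Or.inr ⟨q, List.mem_cons_of_mem _ hq, hwq⟩

-- the by_engine dict and each of its values are ofList dicts (or empty): their keys are Nodup
theorem pvByEngine_nodup (s : List (String × List (String × List (String × Int)))) :
    (pvByEngine s).keys.Nodup := by
  unfold pvByEngine
  cases hg : (PySem.Dict.ofList (s.map (fun p => (p.1, PySem.Dict.ofList (p.2.map (fun q => (q.1, PySem.Dict.ofList q.2))))))).get? "by_engine" with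
  | none => simp [hg, PySem.Dict.empty]
  | some v =>
    have hv : v ∈ (PySem.Dict.ofList (s.map (fun p => (p.1, PySem.Dict.ofList (p.2.map (fun q => (q.1, PySem.Dict.ofList q.2))))))).values := by
      have := PySem.Dict.mem_items_of_get?_eq_some _ hg
      simp only [PySem.Dict.values]
      exact List.mem_map.mpr ⟨_, this, rfl⟩
    rcases pvFoldlInsertValues _ PySem.Dict.empty v (by
      simpa [PySem.Dict.ofList, PySem.Dict.update] using hv) with h | ⟨q, hq, hvq⟩
    · simp [PySem.Dict.empty, PySem.Dict.values] at h
    · rcases List.mem_map.mp hq with ⟨p, _, rfl⟩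
      simp only [hg, Option.getD_some, hvq]
      exact PySem.Dict.nodup_keys_ofList _

theorem pvEf_nodup (s : List (String × List (String × List (String × Int)))) (e : String) :
    (pvEf (pvByEngine s) e).keys.Nodup := by
  unfold pvEf
  cases hg : (pvByEngine s).get? e with
  | none => simp [PySem.Dict.keys, PySem.Dict.empty]
  | some v =>
    simp only [Option.getD_some]
    -- v is a value of pvByEngine s, which is itself empty or an ofList of ofList dicts
    have hv : v ∈ (pvByEngine s).values := by
      have := PySem.Dict.mem_items_of_get?_eq_some _ hg
      simp only [PySem.Dict.values]
      exact List.mem_map.mpr ⟨_, this, rfl⟩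
    unfold pvByEngine at hv
    cases hg2 : (PySem.Dict.ofList (s.map (fun p => (p.1, PySem.Dict.ofList (p.2.map (fun q => (q.1, PySem.Dict.ofList q.2))))))).get? "by_engine" with
    | none => simp [hg2, PySem.Dict.empty, PySem.Dict.values] at hv
    | some w =>
      simp only [hg2, Option.getD_some] at hv
      have hw : w ∈ (PySem.Dict.ofList (s.map (fun p => (p.1, PySem.Dict.ofList (p.2.map (fun q => (q.1, PySem.Dict.ofList q.2))))))).values := by
        have := PySem.Dict.mem_items_of_get?_eq_some _ hg2
        simp only [PySem.Dict.values]
        exact List.mem_map.mpr ⟨_, this, rfl⟩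
      rcases pvFoldlInsertValues _ PySem.Dict.empty w (by
        simpa [PySem.Dict.ofList, PySem.Dict.update] using hw) with h | ⟨q, hq, hwq⟩
      · simp [PySem.Dict.empty, PySem.Dict.values] at h
      · rcases List.mem_map.mp hq with ⟨p, _, rfl⟩
        subst hwq
        rcases pvFoldlInsertValues _ PySem.Dict.empty v (by
          simpa [PySem.Dict.ofList, PySem.Dict.update] using hv) with h | ⟨q2, hq2, hvq2⟩
        · simp [PySem.Dict.empty, PySem.Dict.values] at h
        · rcases List.mem_map.mp hq2 with ⟨r, _, rfl⟩
          simp only [hvq2]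
          exact PySem.Dict.nodup_keys_ofList _

-- Python's sort by the tuple key (k1, k2) IS the sort by the lexicographic key
theorem pvSorted2_eq {α κ₁ κ₂ : Type} [LinearOrder κ₁] [LinearOrder κ₂]
    (xs : List α) (k1 : α → κ₁) (k2 : α → κ₂) :
    PySem.List.sorted2 xs k1 k2 false = PySem.List.sorted xs (fun x => toLex (k1 x, k2 x)) false := by
  rw [PySem.List.sorted_eq_foldl_insertBy]
  show List.foldl (fun acc x => PySem.List.insertBy
      (fun a b => decide (k1 a < k1 b) || !decide (k1 b < k1 a) && decide (k2 a < k2 b)) x acc) [] xs = _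
  have hb : (fun (a b : α) => decide (k1 a < k1 b) || !decide (k1 b < k1 a) && decide (k2 a < k2 b))
      = (fun a b => decide ((toLex (k1 a, k2 a)) < (toLex (k1 b, k2 b)))) := by
    funext a b
    by_cases h1 : k1 a < k1 b
    · simp [Prod.Lex.lt_iff, h1]
    · by_cases h2 : k1 b < k1 a
      · simp [Prod.Lex.lt_iff, h1, h2, ne_of_gt h2]
      · have he : k1 a = k1 b := le_antisymm (not_lt.mp h2) (not_lt.mp h1)
        simp [Prod.Lex.lt_iff, he]
  rw [hb]

-- A's loop over the sorted engines, characterised: it appends 'pvBlock ++ [""]' per nonempty engine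
theorem pvLoopA (d : PySem.Dict String (PySem.Dict String Int)) :
    ∀ (es : List String) (st0 : List String × Bool),
      es.foldl
        (fun (st : List String × Bool) engine =>
          let ef := (d.get? engine).getD PySem.Dict.empty
          if ef.items.isEmpty then st
          else
            let lines := st.1 ++ [pvCapitalize engine ++ ":"]
            let sortedReasons := PySem.List.sorted2 ef.keys (fun r => -(ef.getD r 0)) (fun r => r) false
            let lines := sortedReasons.foldl (fun ls r => ls ++ ["  " ++ r ++ ": " ++ PySem.Int.toStr (ef.getD r 0)]) lines
            (lines ++ [""], true))
        st0
      = (st0.1 ++ ((es.filter (fun e => !(pvEf d e).items.isEmpty)).map (pvBlock d)).flatMap (fun b => b ++ [""]),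
         st0.2 || !(es.filter (fun e => !(pvEf d e).items.isEmpty)).isEmpty) := by
  intro es
  induction es with
  | nil => intro st0; simp
  | cons e es ih =>
    intro st0
    simp only [List.foldl_cons]
    by_cases h : ((d.get? e).getD PySem.Dict.empty).items.isEmpty
    · rw [if_pos h, ih]
      simp [pvEf, h]
    · rw [if_neg h, ih]
      simp [h, pvBlock, pvRs, pvEf, List.append_assoc, ← List.flatMap_def, ← List.map_eq_flatMap]

-- blank-line bookkeeping: block-then-blank concatenation vs blank-then-block with one trailing blank
theorem pvShift :
    ∀ (l : List (List String)) (b : List String),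
      (b :: l).flatMap (fun x => x ++ [""]) = b ++ (l.flatMap (fun x => [""] ++ x) ++ [""]) := by
  intro l
  induction l with
  | nil => intro b; simp
  | cons c l ih => intro b; simp only [List.flatMap_cons] at *; simp [ih c, List.append_assoc]

-- dropping filtered-out elements whose image is empty does not change a flatMap
theorem pvFlatMapFilter {α β : Type} (l : List α) (p : α → Bool) (f : α → List β)
    (h : ∀ e ∈ l, p e = false → f e = []) :
    (l.filter p).flatMap f = l.flatMap f := by
  induction l with
  | nil => rfl
  | cons a l ih =>
    rcases hp : p a with _ | _
    · simp [hp, h a List.mem_cons_self hp,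
        ih (fun e he hpe => h e (List.mem_cons_of_mem _ he) hpe)]
    · simp [hp, ih (fun e he hpe => h e (List.mem_cons_of_mem _ he) hpe)]

-- the displayed engines are strictly increasing
theorem pvEngs_lt (d : PySem.Dict String (PySem.Dict String Int)) (hd : d.keys.Nodup) :
    (pvEngs d).Pairwise (· < ·) := by
  unfold pvEngs
  apply List.Pairwise.filter
  have hle := PySem.List.sorted_pairwise d.keys (fun k => k)
  have hnd : (PySem.List.sorted d.keys (fun k => k) false).Nodup :=
    ((PySem.List.sorted_perm d.keys (fun k => k) false).nodup_iff).mpr hd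
  exact (hle.and hnd).imp (fun h => lt_of_le_of_ne h.1 h.2)

-- a displayed engine has at least one reason line
theorem pvGrp_ne (d : PySem.Dict String (PySem.Dict String Int)) (e : String)
    (h : (pvEf d e).items.isEmpty = false) : pvGrp d e ≠ [] := by
  intro hc
  have hrs : pvRs d e = [] := by simpa [pvGrp] using hc
  unfold pvRs at hrs
  have hk : (pvEf d e).keys = [] := by
    have hp := PySem.List.sorted2_perm (pvEf d e).keys
      (fun r => -((pvEf d e).getD r 0)) (fun r => r) false
    rw [hrs] at hp
    exact (hp.symm).eq_nil
  have hit : (pvEf d e).items = [] := by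
    cases hx : (pvEf d e).items with
    | nil => rfl
    | cons a t => simp [PySem.Dict.keys, hx] at hk
  simp [hit] at h

-- within one engine the sorted reasons have strictly increasing (−count, reason) keys
theorem pvRs_pairwise (d : PySem.Dict String (PySem.Dict String Int)) (e : String)
    (hv : (pvEf d e).keys.Nodup) :
    (pvRs d e).Pairwise (fun r1 r2 =>
      (toLex (-(pvEf d e).getD r1 0, r1)) < (toLex (-(pvEf d e).getD r2 0, r2))) := by
  unfold pvRs
  rw [pvSorted2_eq]
  have hle := PySem.List.sorted_pairwise (pvEf d e).keys
    (fun r => toLex (-(pvEf d e).getD r 0, r))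
  have hnd : (PySem.List.sorted (pvEf d e).keys
      (fun r => toLex (-(pvEf d e).getD r 0, r)) false).Nodup :=
    ((PySem.List.sorted_perm _ _ false).nodup_iff).mpr hv
  refine (hle.and hnd).imp (fun {a b} h => lt_of_le_of_ne h.1 (fun hk => h.2 ?_))
  have := congrArg (fun x => (ofLex x).2) hk
  simpa using this

-- B's global sort produces exactly A's groups, concatenated
theorem pvSortEq (s : List (String × List (String × List (String × Int)))) :
    PySem.List.sorted
      ((pvByEngine s).items.flatMap (fun p => p.2.items.map (fun q => (p.1, -q.2, q.1))))
      (fun t => toLex (t.1, toLex (t.2.1, t.2.2))) false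
    = (pvEngs (pvByEngine s)).flatMap (pvGrp (pvByEngine s)) := by
  have hd := pvByEngine_nodup s
  have hv := pvEf_nodup s
  have hgetD : ∀ e, (pvByEngine s).getD e PySem.Dict.empty = pvEf (pvByEngine s) e := by
    intro e; rw [PySem.Dict.getD_eq_get?_getD]; rfl
  have hitems : (pvByEngine s).items.flatMap (fun p => p.2.items.map (fun q => (p.1, -q.2, q.1)))
      = (pvByEngine s).keys.flatMap
          (fun e => (pvEf (pvByEngine s) e).keys.map (fun r => (e, -((pvEf (pvByEngine s) e).getD r 0), r))) := by
    rw [PySem.Dict.items_eq_map_keys _ hd PySem.Dict.empty, List.flatMap_map]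
    congr 1
    funext e
    rw [show ((e, (pvByEngine s).getD e PySem.Dict.empty) : String × PySem.Dict String Int).2
          = pvEf (pvByEngine s) e from hgetD e,
        PySem.Dict.items_eq_map_keys _ (hv e) 0, List.map_map]
    rfl
  have hempty : ∀ e, (!(pvEf (pvByEngine s) e).items.isEmpty) = false → pvGrp (pvByEngine s) e = [] := by
    intro e hpe
    have hit : (pvEf (pvByEngine s) e).items = [] := by
      simpa [List.isEmpty_iff] using hpe
    have hk : (pvEf (pvByEngine s) e).keys = [] := by simp [PySem.Dict.keys, hit]
    unfold pvGrp pvRs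
    rw [hk]
    rfl
  apply PySem.List.sorted_eq_of_perm_of_pairwise_lt
  · -- permutation
    rw [hitems]
    unfold pvEngs
    rw [pvFlatMapFilter _ _ _ (fun e _ hpe => hempty e hpe)]
    refine List.Perm.flatMap (PySem.List.sorted_perm _ _ false) (fun e _ => ?_)
    unfold pvGrp pvRs
    exact List.Perm.map _ (PySem.List.sorted2_perm _ _ _ false)
  · -- strictly increasing keys
    rw [List.pairwise_flatMap]
    constructor
    · intro e _
      unfold pvGrp
      rw [List.pairwise_map]
      refine (pvRs_pairwise (pvByEngine s) e (hv e)).imp (fun {a b} h => ?_)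
      simp [Prod.Lex.lt_iff, h]
    · refine (pvEngs_lt (pvByEngine s) hd).imp (fun {e1 e2} h x hx y hy => ?_)
      rcases List.mem_map.mp hx with ⟨r1, _, rfl⟩
      rcases List.mem_map.mp hy with ⟨r2, _, rfl⟩
      simp [Prod.Lex.lt_iff, h]

theorem pvScanSame (ts : List (String × Int × String)) (e : String) :
    ∀ (acc : List String), (∀ t ∈ ts, t.1 = e) →
      ts.foldl pvStep (acc, some e) = (acc ++ ts.map pvLineT, some e) := by
  induction ts with
  | nil => intro acc _; simp
  | cons t ts ih =>
    intro acc h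
    have ht : t.1 = e := h t List.mem_cons_self
    simp only [List.foldl_cons]
    have hstep : pvStep (acc, some e) t = (acc ++ [pvLineT t], some e) := by
      simp [pvStep, ht]
    rw [hstep, ih (acc ++ [pvLineT t]) (fun t' ht' => h t' (List.mem_cons_of_mem _ ht'))]
    simp

-- scanning one whole group: separator (unless first), heading, lines
theorem pvScanGrp (d : PySem.Dict String (PySem.Dict String Int)) (e : String)
    (acc : List String) (prev : Option String) (hprev : prev ≠ some e) (hne : pvGrp d e ≠ []) :
    (pvGrp d e).foldl pvStep (acc, prev)
      = ((if prev = none then acc else acc ++ [""]) ++ pvBlock d e, some e) := by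
  rcases hrs : pvRs d e with _ | ⟨r0, rs'⟩
  · exact absurd (by simp [pvGrp, hrs]) hne
  · simp only [pvGrp, hrs, List.map_cons, List.foldl_cons]
    have hstep : pvStep (acc, prev) (e, -((pvEf d e).getD r0 0), r0)
        = ((if prev = none then acc else acc ++ [""]) ++ [pvCapitalize e ++ ":"]
            ++ [pvLineT (e, -((pvEf d e).getD r0 0), r0)], some e) := by
      simp [pvStep, Ne.symm hprev]
    rw [hstep, pvScanSame _ e _ (by
      intro t ht
      rcases List.mem_map.mp ht with ⟨r, _, rfl⟩
      rfl)]
    simp [pvBlock, hrs, pvLineT, List.map_map, Function.comp_def, List.append_assoc]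

-- scanning the remaining groups, one blank-line separator before each
theorem pvScanRest (d : PySem.Dict String (PySem.Dict String Int)) :
    ∀ (es : List String) (e0 : String) (acc : List String),
      (∀ e ∈ es, pvGrp d e ≠ []) → es.Pairwise (· < ·) → (∀ e ∈ es, e0 < e) →
      (es.flatMap (pvGrp d)).foldl pvStep (acc, some e0)
        = (acc ++ es.flatMap (fun e => [""] ++ pvBlock d e), some (es.getLastD e0)) := by
  intro es
  induction es with
  | nil => intro e0 acc _ _ _; simp
  | cons e es ih =>
    intro e0 acc hne hpw hgt
    simp only [List.flatMap_cons, List.foldl_append]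
    rw [pvScanGrp d e acc (some e0)
      (fun hc => absurd (Option.some.inj hc) (ne_of_lt (hgt e List.mem_cons_self)))
      (hne e List.mem_cons_self)]
    have hif : (if (some e0 : Option String) = none then acc else acc ++ [""]) = acc ++ [""] := by simp
    rw [hif, ih e (acc ++ [""] ++ pvBlock d e)
      (fun e' he' => hne e' (List.mem_cons_of_mem _ he'))
      hpw.tail
      (fun e' he' => (List.pairwise_cons.mp hpw).1 e' he')]
    rw [List.getLastD_cons]
    simp [List.append_assoc]

theorem format_failure_summary_text_py_eq (summary : List (String × List (String × List (String × Int)))) :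
    format_failure_summary_text_py summary = format_failure_summary_text_py_alt summary := by
  unfold format_failure_summary_text_py format_failure_summary_text_py_alt
  rw [pvLoopA]
  have hps : (PySem.List.sorted (pvByEngine summary).keys (fun k => k) false).filter
      (fun e => !(pvEf (pvByEngine summary) e).items.isEmpty) = pvEngs (pvByEngine summary) := rfl
  simp only [pvSortEq, hps]
  rcases hf : pvEngs (pvByEngine summary) with _ | ⟨e0, rest⟩
  · -- no failures
    simp
  · -- at least one block
    have hmem : ∀ e ∈ pvEngs (pvByEngine summary), pvGrp (pvByEngine summary) e ≠ [] := by
      intro e he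
      unfold pvEngs at he
      have := (List.mem_filter.mp he).2
      exact pvGrp_ne _ e (by simpa using this)
    have hpw : (e0 :: rest).Pairwise (· < ·) := by
      rw [← hf]; exact pvEngs_lt _ (pvByEngine_nodup summary)
    -- B side: first group, then the rest
    rw [List.flatMap_cons, List.foldl_append,
        pvScanGrp _ e0 _ none (by simp) (hmem e0 (hf ▸ List.mem_cons_self)),
        if_pos rfl,
        pvScanRest _ rest e0 _ (fun e he => hmem e (hf ▸ List.mem_cons_of_mem _ he))
          hpw.tail (fun e he => (List.pairwise_cons.mp hpw).1 e he)]
    -- A side: shift the separators and trim the trailing blank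
    simp only [List.map_cons, pvShift, List.flatMap_map]
    have hlast : ((["Failure Summary", "---------------"] : List String) ++
        (pvBlock (pvByEngine summary) e0 ++
          (rest.flatMap (fun e => [""] ++ pvBlock (pvByEngine summary) e) ++ [""]))).getLast? = some "" := by
      rw [← List.append_assoc, ← List.append_assoc, List.getLast?_concat]
    simp only [List.append_assoc, hlast, List.isEmpty_cons, Bool.not_false, Bool.or_true, if_pos]
    rw [← List.append_assoc, ← List.append_assoc, List.dropLast_concat]
    simp

-- ===== VERDICT (by name: the statement is the Claim_ definition above) =====
theorem format_failure_summary_text_py_spec : Claim_equal_format_failure_summary_text_py := by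
  intro summary _ _
  unfold Spec_format_failure_summary_text_py
  exact format_failure_summary_text_py_eq summary
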